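-- pv_equiv track=rewrite | github.com/alexmickelson/adventOfCode2020 | 10/jolt_adapter.py | count_count_consecutive_ones
-- ===== SOURCE A (Python) =====
-- from math import factorial
--
-- def count_count_consecutive_ones(differences):
--     different_arrangements = []
--     count = 1 if differences[0] == 1 else 0
--     for i in range(1, len(differences)):
--         if(differences[i] != 1):
--             if(count >= 2):
--                 different_arrangements.append(factorial(count) )
--             count = 0
--         elif(differences[i] == 1):
--             count += 1
--         # elif(differences[i-1] == 1 and differences[i] == 1):
--         #     count = 0
--     if(count >= 2):
--         different_arrangements.append(factorial(count) )
--     return sum(different_arrangements)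
-- ===== SOURCE B (Python) =====
-- from math import factorial
--
-- def count_count_consecutive_ones(differences):
--     bounds = [-1] + [i for i, d in enumerate(differences) if d != 1] + [len(differences)]
--     return sum(factorial(b - a - 1) for a, b in zip(bounds, bounds[1:]) if b - a - 1 >= 2)
-- ===== Notes on version B (the rewrite author's own statement) =====
-- stated objective: alternative
-- what changed: Instead of scanning with a run-length counter, B collects the indices of non-1 elements as boundary positions (with sentinels -1 and len) and sums factorial(gap) over adjacent boundary pairs whose gap b-a-1 is at least 2; Pre_ excludes only the empty list, on which A raises IndexError.
import Mathlib
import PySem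

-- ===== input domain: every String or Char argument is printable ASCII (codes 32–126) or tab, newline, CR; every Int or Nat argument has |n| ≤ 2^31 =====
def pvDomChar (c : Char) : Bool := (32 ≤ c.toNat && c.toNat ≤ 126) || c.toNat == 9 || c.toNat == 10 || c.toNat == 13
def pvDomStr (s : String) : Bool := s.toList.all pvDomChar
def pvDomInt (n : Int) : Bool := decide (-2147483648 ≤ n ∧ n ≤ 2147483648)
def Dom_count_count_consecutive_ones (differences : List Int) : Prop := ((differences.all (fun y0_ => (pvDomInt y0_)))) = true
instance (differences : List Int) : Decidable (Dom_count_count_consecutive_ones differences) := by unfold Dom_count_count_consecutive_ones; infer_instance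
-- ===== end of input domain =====

-- B replaces A's run-length counter by collecting the indices of non-1 elements as
-- boundaries (with sentinels -1 and len) and summing factorial over adjacent-boundary
-- gaps >= 2 (alternative decomposition); equivalence proved on non-empty lists.


-- ===== PORT A =====
-- literal transliteration of A: state (different_arrangements, count), loop over range(1, len)
def count_count_consecutive_ones (differences : List Int) : Int :=
  let count0 : Int := if (PySem.List.pyGetD differences 0 0) == 1 then 1 else 0
  let st :=
    (PySem.List.pyRange 1 (differences.length : Int) 1).foldl
      (fun (st : List Int × Int) i =>
        let d := PySem.List.pyGetD differences i 0
        if d ≠ 1 then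
          ((if st.2 ≥ 2 then st.1 ++ [(Nat.factorial st.2.toNat : Int)] else st.1), 0)
        else
          (st.1, st.2 + 1))
      (([] : List Int), count0)
  let arr := if st.2 ≥ 2 then st.1 ++ [(Nat.factorial st.2.toNat : Int)] else st.1
  arr.sum

-- ===== PORT B =====
-- literal transliteration of B: boundary indices of non-1 entries with sentinels,
-- then sum factorial(b-a-1) over adjacent pairs with gap >= 2
def count_count_consecutive_ones_alt (differences : List Int) : Int :=
  let bounds : List Int :=
    [(-1 : Int)]
      ++ ((PySem.List.enumerate differences).filter (fun p => p.2 != 1)).map (fun p => p.1)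
      ++ [(differences.length : Int)]
  (((bounds.zip bounds.tail).filter (fun ab => decide (ab.2 - ab.1 - 1 ≥ 2))).map
      (fun ab => (Nat.factorial (ab.2 - ab.1 - 1).toNat : Int))).sum

-- ===== PRECONDITION & SPEC =====
-- A raises IndexError on the empty list (it reads differences[0]); excluded.
def Pre_count_count_consecutive_ones (differences : List Int) : Prop := differences ≠ []
instance (differences : List Int) : Decidable (Pre_count_count_consecutive_ones differences) := by unfold Pre_count_count_consecutive_ones; infer_instance
def pvWitness_count_count_consecutive_ones : List Int := [1, 1, 3, 1]

def Spec_count_count_consecutive_ones (differences : List Int) (out : Int) : Prop := out = count_count_consecutive_ones_alt differences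
instance (differences : List Int) (out : Int) : Decidable (Spec_count_count_consecutive_ones differences out) := by unfold Spec_count_count_consecutive_ones; infer_instance

-- ===== CLAIM (what is proved, stated in full; the proofs are below) =====
def Claim_equal_count_count_consecutive_ones : Prop := ∀ (differences : List Int), Dom_count_count_consecutive_ones differences → Pre_count_count_consecutive_ones differences → Spec_count_count_consecutive_ones differences (count_count_consecutive_ones differences)

-- ===== LEMMAS AND PROOFS =====

-- reference function: pvG xs c = remaining contribution when processing xs with current run count c
def pvContrib (c : Int) : Int := if c ≥ 2 then (Nat.factorial c.toNat : Int) else 0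

def pvG (xs : List Int) (c : Int) : Int :=
  match xs with
  | [] => pvContrib c
  | d :: rest =>
      if d = 1 then pvG rest (c + 1)
      else pvContrib c + pvG rest 0

-- the A-side step function
def pvStepA (st : List Int × Int) (d : Int) : List Int × Int :=
  if d ≠ 1 then
    ((if st.2 ≥ 2 then st.1 ++ [(Nat.factorial st.2.toNat : Int)] else st.1), 0)
  else (st.1, st.2 + 1)

theorem pvA_fold (xs : List Int) : ∀ (acc : List Int) (c : Int),
    (let st := xs.foldl pvStepA (acc, c)
     (if st.2 ≥ 2 then st.1 ++ [(Nat.factorial st.2.toNat : Int)] else st.1).sum)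
    = acc.sum + pvG xs c := by
  induction xs with
  | nil =>
    intro acc c
    simp only [List.foldl_nil, pvG, pvContrib]
    split <;> simp
  | cons d rest ih =>
    intro acc c
    simp only [List.foldl_cons, pvG, pvStepA]
    by_cases hd : d = 1
    · simp [hd, ih]
    · simp only [hd, ne_eq, not_false_iff, if_true, if_neg]
      rw [show (if (acc, c).2 ≥ 2 then (acc, c).1 ++ [(Nat.factorial (acc, c).2.toNat : Int)] else (acc, c).1, (0:Int)) = ((if c ≥ 2 then acc ++ [(Nat.factorial c.toNat : Int)] else acc), (0:Int)) from rfl]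
      rw [ih]
      unfold pvContrib
      split <;> simp <;> try ring

-- A on a nonempty list equals pvG of the whole list with count 0
theorem pvA_eq_G (x : Int) (xs : List Int) :
    count_count_consecutive_ones (x :: xs) = pvG (x :: xs) 0 := by
  unfold count_count_consecutive_ones
  have hfold : (PySem.List.pyRange 1 ((x :: xs).length : Int) 1).foldl
      (fun (st : List Int × Int) i => pvStepA st (PySem.List.pyGetD (x :: xs) i 0))
      (([] : List Int), if (PySem.List.pyGetD (x :: xs) 0 0) == 1 then 1 else 0)
      = xs.foldl pvStepA (([] : List Int), if (PySem.List.pyGetD (x :: xs) 0 0) == 1 then 1 else 0) := by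
    have := PySem.List.foldl_pyRange_pyGetD (xs := x :: xs) (a := 1) (d := 0)
      (f := pvStepA) (init := (([] : List Int), if (PySem.List.pyGetD (x :: xs) 0 0) == 1 then 1 else 0)) (by norm_num)
    simpa using this
  simp only [show (fun (st : List Int × Int) i =>
      let d := PySem.List.pyGetD (x :: xs) i 0
      if d ≠ 1 then
        ((if st.2 ≥ 2 then st.1 ++ [(Nat.factorial st.2.toNat : Int)] else st.1), 0)
      else (st.1, st.2 + 1)) = (fun (st : List Int × Int) i => pvStepA st (PySem.List.pyGetD (x :: xs) i 0)) from rfl]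
  rw [hfold]
  have := pvA_fold xs ([] : List Int) (if (PySem.List.pyGetD (x :: xs) 0 0) == 1 then 1 else 0)
  simp only [List.sum_nil, zero_add] at this
  rw [this]
  have hget : PySem.List.pyGetD (x :: xs) 0 0 = x := by simp [PySem.List.pyGetD_zero_cons]
  rw [hget]
  by_cases hx : x = 1
  · simp [hx, pvG]
  · simp [hx, pvG, pvContrib]

-- B-side: recursive form of the adjacent-pair sum
def pvSP : List Int → Int
  | a :: b :: t => pvContrib (b - a - 1) + pvSP (b :: t)
  | _ => 0

-- the filtered-zip sum in the port equals pvSP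
theorem pvSP_eq (bs : List Int) :
    (((bs.zip bs.tail).filter (fun ab => decide (ab.2 - ab.1 - 1 ≥ 2))).map
        (fun ab => (Nat.factorial (ab.2 - ab.1 - 1).toNat : Int))).sum = pvSP bs := by
  induction bs with
  | nil => simp [pvSP]
  | cons a t ih =>
    cases t with
    | nil => simp [pvSP]
    | cons b t2 =>
      simp only [List.tail_cons, List.zip_cons_cons, List.filter_cons] at ih ⊢
      have hrhs : pvSP (a :: b :: t2) = pvContrib (b - a - 1) + pvSP (b :: t2) := rfl
      by_cases h : b - a - 1 ≥ 2
      · rw [if_pos (by simpa using h)]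
        simp only [List.map_cons, List.sum_cons, ih, hrhs, pvContrib, if_pos h]
      · rw [if_neg (by simpa using h), ih, hrhs]
        simp [pvContrib, h]
-- index list of non-1 entries starting at index s
def pvIdx (l : List Int) (s : Int) : List Int :=
  ((PySem.List.enumerate l s).filter (fun p => p.2 != 1)).map (fun p => p.1)

theorem pvIdx_cons (x : Int) (xs : List Int) (s : Int) :
    pvIdx (x :: xs) s = (if x = 1 then [] else [s]) ++ pvIdx xs (s + 1) := by
  unfold pvIdx
  rw [PySem.List.enumerate_cons]
  by_cases hx : x = 1 <;> simp [hx]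

-- main B-side lemma: boundaries starting at index s with c pending ones give pvG
theorem pvSP_eq_G (xs : List Int) : ∀ (s c : Int), 0 ≤ c →
    pvSP ((s - 1 - c) :: (pvIdx xs s ++ [s + (xs.length : Int)])) = pvG xs c := by
  induction xs with
  | nil =>
    intro s c hc
    simp [pvIdx, PySem.List.enumerate, pvSP, pvG]
    rw [show s - (s - 1 - c) - 1 = c by ring]
  | cons x xs ih =>
    intro s c hc
    rw [pvIdx_cons]
    by_cases hx : x = 1
    · subst hx
      rw [if_pos rfl, List.nil_append]
      have h1 : s - 1 - c = (s + 1) - 1 - (c + 1) := by ring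
      have h2 : s + (((1 : Int) :: xs).length : Int) = (s + 1) + (xs.length : Int) := by
        simp; ring
      rw [h1, h2, ih (s + 1) (c + 1) (by omega)]
      simp [pvG]
    · simp only [hx, if_false, List.cons_append, List.nil_append]
      have h2 : s + ((x :: xs).length : Int) = (s + 1) + (xs.length : Int) := by
        simp; ring
      rw [h2]
      have hstep : pvSP ((s - 1 - c) :: s :: (pvIdx xs (s + 1) ++ [(s + 1) + (xs.length : Int)]))
          = pvContrib (s - (s - 1 - c) - 1) + pvSP (s :: (pvIdx xs (s + 1) ++ [(s + 1) + (xs.length : Int)])) := by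
        rfl
      have h3 := ih (s + 1) 0 le_rfl
      rw [show (s + 1 : Int) - 1 - 0 = s by ring] at h3
      rw [hstep, show s - (s - 1 - c) - 1 = c by ring, h3]
      simp [pvG, hx]

-- B equals pvG of the whole list with count 0
theorem pvB_eq_G (l : List Int) : count_count_consecutive_ones_alt l = pvG l 0 := by
  unfold count_count_consecutive_ones_alt
  have h := pvSP_eq_G l 0 0 le_rfl
  simp only [show (0 : Int) - 1 - 0 = -1 by ring, zero_add] at h
  rw [← h, ← pvSP_eq]
  rfl

-- ===== VERDICT (by name: the statement is the Claim_ definition above) =====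
theorem count_count_consecutive_ones_spec : Claim_equal_count_count_consecutive_ones := by
  intro differences _ hpre
  unfold Spec_count_count_consecutive_ones
  rw [pvB_eq_G]
  cases differences with
  | nil => exact absurd rfl hpre
  | cons x xs => exact pvA_eq_G x xs
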